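-- pv_equiv track=rewrite | github.com/rajshirolkar/coding_practice | leetcode/3241-divide-array-into-arrays-with-max-difference/divide-array-into-arrays-with-max-difference.py | divideArray
-- ===== SOURCE A (Python) =====
-- from typing import List
--
-- def divideArray(nums: List[int], k: int) -> List[List[int]]:
--     nums = sorted(nums)
--     ans = []
--     i = 0
--     while i < len(nums)-2:
--         if nums[i+2] - nums[i] > k:
--             return []
--         else:
--             ans.append([nums[i], nums[i+1], nums[i+2]])
--         i += 3
--     return ans
-- ===== SOURCE B (Python) =====
-- from typing import List
--
-- def divideArray(nums: List[int], k: int) -> List[List[int]]: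
--     s = sorted(nums)
--     lows, mids, highs = s[0::3], s[1::3], s[2::3]
--     # zip truncates to the shortest column, so leftover 1-2 elements drop out
--     if any(h - l > k for l, h in zip(lows, highs)):
--         return []
--     return [[l, m, h] for l, m, h in zip(lows, mids, highs)]
-- ===== Notes on version B (the rewrite author's own statement) =====
-- stated objective: alternative
-- what changed: Replaces A's index-based while loop over triples (check-then-append with early return) by a columnar algorithm: the sorted array is split into three strided columns s[0::3], s[1::3], s[2::3]; the low and high columns are compared elementwise via zip to detect a violation, and the triples are rebuilt by zipping the three columns (zip's truncation drops leftover elements).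
import Mathlib
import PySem

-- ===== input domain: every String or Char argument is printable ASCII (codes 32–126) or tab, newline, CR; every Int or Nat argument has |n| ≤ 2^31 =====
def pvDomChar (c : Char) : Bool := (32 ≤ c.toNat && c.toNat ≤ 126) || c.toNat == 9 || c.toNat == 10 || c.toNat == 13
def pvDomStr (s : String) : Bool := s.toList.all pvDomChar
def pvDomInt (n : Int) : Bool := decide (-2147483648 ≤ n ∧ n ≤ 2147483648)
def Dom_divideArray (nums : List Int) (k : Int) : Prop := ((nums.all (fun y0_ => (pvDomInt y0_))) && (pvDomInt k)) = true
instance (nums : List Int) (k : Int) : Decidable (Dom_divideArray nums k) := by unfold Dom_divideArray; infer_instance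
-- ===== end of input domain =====

-- B replaces A's index-walking while loop by a columnar algorithm: three strided
-- slices of the sorted array, violation check and triple rebuild via zip; same cost.


-- ===== PORT A =====
-- the while loop: i steps by 3 while i < len(nums)-2; check-then-append with early return []
def divideArrayLoopA (s : List Int) (k : Int) (i : Nat) (ans : List (List Int)) : List (List Int) :=
  if _h : (i : Int) < (s.length : Int) - 2 then
    if PySem.List.pyGetD s ((i : Int) + 2) 0 - PySem.List.pyGetD s (i : Int) 0 > k then []
    else divideArrayLoopA s k (i + 3)
      (ans ++ [[PySem.List.pyGetD s (i : Int) 0, PySem.List.pyGetD s ((i : Int) + 1) 0,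
                PySem.List.pyGetD s ((i : Int) + 2) 0]])
  else ans
termination_by s.length - i
decreasing_by omega

def divideArray (nums : List Int) (k : Int) : List (List Int) :=
  divideArrayLoopA (PySem.List.sorted nums (fun x => x) false) k 0 []

-- ===== PORT B =====
-- s[j::3] is PySem.List.slice?; step 3 ≠ 0 so it is always `some`, .getD [] unwraps it
def divideArray_alt (nums : List Int) (k : Int) : List (List Int) :=
  let s := PySem.List.sorted nums (fun x => x) false
  let lows := (PySem.List.slice? s (some 0) none 3).getD []
  let mids := (PySem.List.slice? s (some 1) none 3).getD []
  let highs := (PySem.List.slice? s (some 2) none 3).getD []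
  if (lows.zip highs).any (fun p => p.2 - p.1 > k) then []
  else (lows.zip (mids.zip highs)).map (fun p => [p.1, p.2.1, p.2.2])

-- ===== PRECONDITION & SPEC =====
def Spec_divideArray (nums : List Int) (k : Int) (out : List (List Int)) : Prop := out = divideArray_alt nums k
instance (nums : List Int) (k : Int) (out : List (List Int)) : Decidable (Spec_divideArray nums k out) := by unfold Spec_divideArray; infer_instance

-- ===== CLAIM (what is proved, stated in full; the proofs are below) =====
def Claim_equal_divideArray : Prop := ∀ (nums : List Int) (k : Int), Dom_divideArray nums k → Spec_divideArray nums k (divideArray nums k)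

-- ===== LEMMAS AND PROOFS =====

-- reference: every third element
def every3 : List Int → List Int
  | [] => []
  | x :: xs => x :: every3 (xs.drop 2)
termination_by xs => xs.length
decreasing_by simp [List.length_drop]


-- reference: full triples of a list, leftovers dropped
def chunk3 : List Int → List (Int × Int × Int)
  | a :: b :: c :: r => (a, b, c) :: chunk3 r
  | _ => []

theorem every3_nil : every3 [] = [] := by rw [every3.eq_def]

theorem every3_cons (x : Int) (xs : List Int) :
    every3 (x :: xs) = x :: every3 (xs.drop 2) := by rw [every3.eq_def]

theorem colCore (j : Nat) (s : List Int) :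
    List.filterMap (fun k : Nat => s[((j : Int) + 3 * (k : Int)).toNat]?)
      (List.range (if (j : Int) < (s.length : Int) then (((s.length : Int) - j + 2) / 3).toNat else 0))
    = every3 (s.drop j) := by
  induction hn : s.length using Nat.strong_induction_on generalizing s with
  | _ n ih =>
    subst hn
    by_cases hj : (j : Int) < (s.length : Int)
    · have hjn : j < s.length := by exact_mod_cast hj
      rw [if_pos hj]
      have hcnt : (((s.length : Int) - j + 2) / 3).toNat
          = (if (j : Int) < ((s.drop 3).length : Int)
             then ((((s.drop 3).length : Int) - j + 2) / 3).toNat else 0) + 1 := by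
        rw [List.length_drop]
        split_ifs with h2 <;> push_cast at h2 ⊢ <;> omega
      rw [hcnt, List.range_succ_eq_map]
      simp only [List.filterMap_cons, List.filterMap_map]
      have h0 : (((j : Int)) + 3 * (((0:Nat)) : Int)).toNat = j := by simp
      rw [h0, List.getElem?_eq_getElem hjn]
      have hfun : ∀ x ∈ List.range (if (j : Int) < ((s.drop 3).length : Int)
          then ((((s.drop 3).length : Int) - j + 2) / 3).toNat else 0),
          ((fun k : Nat => s[((j : Int) + 3 * (k : Int)).toNat]?) ∘ (fun k => k + 1)) x
            = (fun k : Nat => (s.drop 3)[((j : Int) + 3 * (k : Int)).toNat]?) x := by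
        intro x _
        simp only [Function.comp_apply]
        rw [List.getElem?_drop]
        congr 1
        push_cast
        omega
      rw [List.filterMap_congr hfun]
      rw [ih (s.drop 3).length (by rw [List.length_drop]; omega) (s.drop 3) rfl]
      rw [List.drop_eq_getElem_cons hjn, every3_cons, List.drop_drop, List.drop_drop,
          show 3 + j = j + 1 + 2 by omega]
    · rw [if_neg hj]
      have hd : s.drop j = [] := List.drop_eq_nil_of_le (by omega)
      simp [hd, every3_nil]

theorem slice3_eq (s : List Int) (j : Nat) :
    (PySem.List.slice? s (some (j : Int)) none 3).getD [] = every3 (s.drop j) := by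
  have hc := colCore j s
  have hneg : ¬ ((j : Int) < 0) := by omega
  simp only [PySem.List.slice?, PySem.List.sliceIndices,
    if_neg (show ¬ ((3:Int) = 0) by norm_num), if_neg (show ¬ ((3:Int) < 0) by norm_num),
    if_neg hneg, Option.getD_some]
  by_cases hj : (j : Int) < (s.length : Int)
  · have hmin : min (j : Int) (s.length : Int) = (j : Int) := min_eq_left (le_of_lt hj)
    rw [if_pos hj] at hc
    rw [hmin, if_pos (show (0:Int) < 3 by norm_num), if_pos hj]
    rw [show ((s.length : Int) - (j : Int) + 3 - 1) = ((s.length : Int) - (j : Int) + 2) by ring]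
    exact hc
  · have hmin : min (j : Int) (s.length : Int) = (s.length : Int) := min_eq_right (by omega)
    rw [if_neg hj] at hc
    rw [hmin, if_pos (show (0:Int) < 3 by norm_num),
        if_neg (show ¬ ((s.length : Int) < (s.length : Int)) by omega)]
    simpa using hc

theorem zipLH_eq (s : List Int) :
    (every3 s).zip (every3 (s.drop 2)) = (chunk3 s).map (fun t => (t.1, t.2.2)) := by
  induction hn : s.length using Nat.strong_induction_on generalizing s with
  | _ n ih =>
    rcases s with _ | ⟨a, _ | ⟨b, _ | ⟨c, r⟩⟩⟩
    · simp [every3_nil, chunk3]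
    · simp [every3_cons, every3_nil, chunk3]
    · simp [every3_cons, every3_nil, chunk3]
    · have h1 : every3 (a :: b :: c :: r) = a :: every3 r := by rw [every3_cons]; rfl
      have h3 : every3 ((a :: b :: c :: r).drop 2) = c :: every3 (r.drop 2) := by
        show every3 (c :: r) = _; rw [every3_cons]
      rw [h1, h3, chunk3, List.map_cons, List.zip_cons_cons]
      rw [ih r.length (by simp at hn; omega) r rfl]

theorem zip3_eq (s : List Int) :
    (every3 s).zip ((every3 (s.drop 1)).zip (every3 (s.drop 2))) = chunk3 s := by
  induction hn : s.length using Nat.strong_induction_on generalizing s with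
  | _ n ih =>
    rcases s with _ | ⟨a, _ | ⟨b, _ | ⟨c, r⟩⟩⟩
    · simp [every3_nil, chunk3]
    · simp [every3_cons, every3_nil, chunk3]
    · simp [every3_cons, every3_nil, chunk3]
    · have h1 : every3 (a :: b :: c :: r) = a :: every3 r := by rw [every3_cons]; rfl
      have h2 : every3 ((a :: b :: c :: r).drop 1) = b :: every3 (r.drop 1) := by
        show every3 (b :: c :: r) = _; rw [every3_cons]; rfl
      have h3 : every3 ((a :: b :: c :: r).drop 2) = c :: every3 (r.drop 2) := by
        show every3 (c :: r) = _; rw [every3_cons]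
      rw [h1, h2, h3, chunk3, List.zip_cons_cons, List.zip_cons_cons]
      rw [ih r.length (by simp at hn; omega) r rfl]

theorem getD_idx (s : List Int) (i : Nat) (h : i < s.length) :
    PySem.List.pyGetD s (i : Int) 0 = s[i] := by
  rw [PySem.List.pyGetD_eq_getElem s 0 (by positivity) (by exact_mod_cast h)]
  simp

theorem getD_idx_add (s : List Int) (i j : Nat) (h : i + j < s.length) :
    PySem.List.pyGetD s ((i : Int) + (j : Int)) 0 = s[i + j] := by
  have : ((i : Int) + (j : Int)) = (((i + j : Nat)) : Int) := by push_cast; ring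
  rw [this, getD_idx s (i + j) h]

theorem drop_three (s : List Int) (i : Nat) (h : i + 2 < s.length) :
    s.drop i = s[i] :: s[i + 1] :: s[i + 2] :: s.drop (i + 3) := by
  rw [List.drop_eq_getElem_cons (by omega)]
  rw [List.drop_eq_getElem_cons (show i + 1 < s.length by omega)]
  rw [List.drop_eq_getElem_cons (show i + 2 < s.length by omega)]

theorem loopA_eq (s : List Int) (k : Int) (i : Nat) (ans : List (List Int)) :
    divideArrayLoopA s k i ans =
      (if (chunk3 (s.drop i)).any (fun t => t.2.2 - t.1 > k) then []
       else ans ++ (chunk3 (s.drop i)).map (fun t => [t.1, t.2.1, t.2.2])) := by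
  induction hn : s.length - i using Nat.strong_induction_on generalizing i ans with
  | _ n ih =>
    rw [divideArrayLoopA]
    by_cases h : (i : Int) < (s.length : Int) - 2
    · have hi2 : i + 2 < s.length := by omega
      rw [dif_pos h, drop_three s i hi2, chunk3]
      have hA : PySem.List.pyGetD s (i : Int) 0 = s[i] := getD_idx s i (by omega)
      have hB : PySem.List.pyGetD s ((i : Int) + 1) 0 = s[i + 1] := by
        have h' := getD_idx_add s i 1 (by omega); push_cast at h' ⊢; exact h'
      have hC : PySem.List.pyGetD s ((i : Int) + 2) 0 = s[i + 2] := by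
        have h' := getD_idx_add s i 2 hi2; push_cast at h' ⊢; exact h'
      rw [hA, hB, hC]
      simp only [List.any_cons, List.map_cons]
      by_cases hv : s[i + 2] - s[i] > k
      · rw [if_pos hv, decide_eq_true hv]
        simp
      · rw [if_neg hv, decide_eq_false hv, Bool.false_or]
        have hstep : ((i : Int) + 3) = (((i + 3 : Nat)) : Int) := by push_cast; ring
        rw [ih (s.length - (i + 3)) (by omega) (i + 3) _ rfl]
        by_cases ha : (chunk3 (s.drop (i + 3))).any (fun t => decide (t.2.2 - t.1 > k)) = true
        · rw [if_pos ha, if_pos ha]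
        · rw [if_neg ha, if_neg ha]
          simp
    · rw [dif_neg h]
      have hc : chunk3 (s.drop i) = [] := by
        have hlen : (s.drop i).length < 3 := by rw [List.length_drop]; omega
        rcases hd : s.drop i with _ | ⟨a, _ | ⟨b, _ | ⟨c, r⟩⟩⟩
        · rfl
        · rfl
        · rfl
        · rw [hd] at hlen; simp at hlen; omega
      rw [hc]
      simp

-- ===== VERDICT (by name: the statement is the Claim_ definition above) =====
theorem divideArray_spec : Claim_equal_divideArray := by
  intro nums k _
  unfold Spec_divideArray divideArray divideArray_alt
  rw [loopA_eq]
  simp only [List.drop_zero]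
  rw [show ((0:Int) = ((0:Nat):Int)) from rfl, show ((1:Int) = ((1:Nat):Int)) from rfl,
      show ((2:Int) = ((2:Nat):Int)) from rfl, slice3_eq, slice3_eq, slice3_eq]
  simp only [List.drop_zero, zipLH_eq, zip3_eq, List.any_map]
  rfl
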